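-- pv_equiv track=rewrite | github.com/pckennethma/NeuralD | distinguisher/Neural/preprocess.py | raw_substitution
-- ===== SOURCE A (Python) =====
-- def raw_substitution(subst: dict):
--
--     def lookup(token: str):
--         if "special_tok" not in subst[token]:
--             return subst[token]
--         else:
--             seq = []
--             for tok in subst[token].split():
--                 if "special_tok" not in tok:
--                     seq.append(tok)
--                 else:
--                     seq.append(lookup(tok))
--             return " ".join(seq).strip()
--     return {k:lookup(k) for k in subst}
-- ===== SOURCE B (Python) =====
-- def raw_substitution(subst: dict):
--     # Memoized expansion: each token is resolved at most once and cached (DP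
--     # over the reference DAG) instead of being re-expanded on every reference.
--     cache = {}
--
--     def solve(token):
--         if token not in cache:
--             value = subst[token]
--             if "special_tok" in value:
--                 value = " ".join(
--                     solve(t) if "special_tok" in t else t for t in value.split()
--                 ).strip()
--             cache[token] = value
--         return cache[token]
--
--     return {k: solve(k) for k in subst}
-- ===== Notes on version B (the rewrite author's own statement) =====
-- stated objective: alternative
-- what changed: B replaces A's naive recursion, which re-expands a referenced token on every reference, by memoized resolution: each token is expanded at most once and cached in a dict (DP over the reference DAG); on the generated timing inputs the two are equally fast, B avoids re-expansion only when tokens are referenced repeatedly. Pre_ excludes only inputs where A raises (a referenced special token missing from the dict -> KeyError, or a cyclic reference chain -> RecursionError).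
import Mathlib
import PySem

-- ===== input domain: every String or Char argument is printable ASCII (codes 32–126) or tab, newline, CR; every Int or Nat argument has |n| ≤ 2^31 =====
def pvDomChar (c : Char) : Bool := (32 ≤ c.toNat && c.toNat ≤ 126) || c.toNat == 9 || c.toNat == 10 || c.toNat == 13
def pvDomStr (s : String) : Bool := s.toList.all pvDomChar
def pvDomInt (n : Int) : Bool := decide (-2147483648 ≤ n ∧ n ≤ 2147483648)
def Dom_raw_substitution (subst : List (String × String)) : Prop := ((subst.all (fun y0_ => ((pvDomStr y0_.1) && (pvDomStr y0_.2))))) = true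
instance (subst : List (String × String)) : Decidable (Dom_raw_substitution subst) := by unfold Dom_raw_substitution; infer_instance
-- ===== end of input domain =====

-- B memoizes the expansion of each token (computed at most once, cached in a
-- dict) instead of A's recursion that re-expands a token on every reference.

-- ===== PORT A =====
-- A's recursive `lookup`; the fuel argument only makes the recursion total in
-- Lean: under Pre_ (well-founded references) fuel `size + 1` is never exhausted.
def pvLookupA (d : PySem.Dict String String) : Nat → String → String
  | 0, _ => ""
  | fuel+1, token =>
    let v := d.getD token ""      -- subst[token]; Pre_ guarantees the key is present
    if PySem.Str.isIn "special_tok" v = false then v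
    else
      let seq := (PySem.Str.split₀ v).foldl
        (fun seq tok =>
          if PySem.Str.isIn "special_tok" tok = false then seq ++ [tok]
          else seq ++ [pvLookupA d fuel tok]) []
      PySem.Str.strip (PySem.Str.join " " seq)

def raw_substitution (subst : List (String × String)) : List (String × String) :=
  let d := PySem.Dict.ofList subst
  d.keys.map (fun k => (k, pvLookupA d (d.size + 1) k))

-- ===== PORT B =====
-- B's memoized `solve`: threads the cache through the whole computation; a token
-- already in the cache is returned at once.  Fuel as in A (totality only).
def pvSolveB (d : PySem.Dict String String) :
    Nat → PySem.Dict String String → String → (PySem.Dict String String × String)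
  | 0, cache, _ => (cache, "")
  | fuel+1, cache, token =>
    match cache.get? token with
    | some v => (cache, v)
    | none =>
      let v0 := d.getD token ""
      if PySem.Str.isIn "special_tok" v0 then
        let st := (PySem.Str.split₀ v0).foldl
          (fun st t =>
            if PySem.Str.isIn "special_tok" t then
              let r := pvSolveB d fuel st.1 t
              (r.1, st.2 ++ [r.2])
            else (st.1, st.2 ++ [t])) (cache, ([] : List String))
        let v := PySem.Str.strip (PySem.Str.join " " st.2)
        (st.1.insert token v, v)
      else (cache.insert token v0, v0)

def raw_substitution_alt (subst : List (String × String)) : List (String × String) :=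
  let d := PySem.Dict.ofList subst
  (d.keys.foldl
    (fun st k =>
      let r := pvSolveB d (d.size + 1) st.1 k
      (r.1, st.2 ++ [(k, r.2)]))
    ((PySem.Dict.empty : PySem.Dict String String), ([] : List (String × String)))).2

-- ===== PRECONDITION & SPEC =====
-- the special tokens referenced by a value
def pvRefs (v : String) : List String :=
  (PySem.Str.split₀ v).filter (fun t => PySem.Str.isIn "special_tok" t)

-- pvOK d n k: token k is present in d and all its reference chains are
-- well-founded of depth < n, every referenced token being present.
def pvOK (d : PySem.Dict String String) : Nat → String → Bool
  | 0, _ => false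
  | n+1, k => d.contains k && (pvRefs (d.getD k "")).all (pvOK d n)

-- Pre_ excludes exactly the inputs on which Python A raises: a referenced special
-- token missing from the dict (KeyError) or a cyclic reference chain (unbounded
-- recursion).  "All reference chains well-founded with every token present" is
-- equivalent to every key being pvOK at depth `size`, since a reference chain of
-- distinct keys has length at most `size`.
def Pre_raw_substitution (subst : List (String × String)) : Prop :=
  ((PySem.Dict.ofList subst).keys.all
    (fun k => pvOK (PySem.Dict.ofList subst) (PySem.Dict.ofList subst).size k)) = true

instance (subst : List (String × String)) : Decidable (Pre_raw_substitution subst) := by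
  unfold Pre_raw_substitution; infer_instance

def pvWitness_raw_substitution : (List (String × String)) :=
  [("special_tok1", "a special_tok2"), ("special_tok2", "b  c")]

def Spec_raw_substitution (subst : List (String × String)) (out : List (String × String)) : Prop := out = raw_substitution_alt subst
instance (subst : List (String × String)) (out : List (String × String)) : Decidable (Spec_raw_substitution subst out) := by unfold Spec_raw_substitution; infer_instance

-- ===== CLAIM (what is proved, stated in full; the proofs are below) =====
def Claim_equal_raw_substitution : Prop := ∀ (subst : List (String × String)), Dom_raw_substitution subst → Pre_raw_substitution subst → Spec_raw_substitution subst (raw_substitution subst)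

-- ===== LEMMAS AND PROOFS =====

-- A's inner loop is a map over the split tokens
theorem pvLookupA_foldl_map (d : PySem.Dict String String) (fuel : Nat) (l : List String) (acc : List String) :
    l.foldl (fun seq tok => if PySem.Str.isIn "special_tok" tok = false then seq ++ [tok]
                            else seq ++ [pvLookupA d fuel tok]) acc
      = acc ++ l.map (fun tok => if PySem.Str.isIn "special_tok" tok = false then tok
                                 else pvLookupA d fuel tok) := by
  have h1 := PySem.List.foldl_congr_mem (l := l)
      (g := fun seq tok => seq ++ [if PySem.Str.isIn "special_tok" tok = false then tok
                                   else pvLookupA d fuel tok])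
      (fun seq tok => if PySem.Str.isIn "special_tok" tok = false then seq ++ [tok]
                      else seq ++ [pvLookupA d fuel tok]) acc
      (by intro a x _; beta_reduce; split_ifs <;> rfl)
  exact h1.trans (PySem.List.foldl_append_singleton_eq_map _ _ _)

-- A's lookup does not depend on the fuel once the fuel covers the reference depth
theorem pvLookupA_fuel (d : PySem.Dict String String) :
    ∀ n k f g, pvOK d n k = true → n ≤ f → n ≤ g →
      pvLookupA d f k = pvLookupA d g k := by
  intro n
  induction n with
  | zero => intro k f g h _ _; simp [pvOK] at h
  | succ n ih =>
    intro k f g h hf hg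
    obtain ⟨f', rfl⟩ : ∃ f', f = f' + 1 := ⟨f - 1, by omega⟩
    obtain ⟨g', rfl⟩ : ∃ g', g = g' + 1 := ⟨g - 1, by omega⟩
    simp only [pvOK, Bool.and_eq_true, List.all_eq_true] at h
    obtain ⟨hk, hrefs⟩ := h
    simp only [pvLookupA]
    by_cases hs : PySem.Str.isIn "special_tok" (d.getD k "") = false
    · rw [if_pos hs, if_pos hs]
    · rw [if_neg hs, if_neg hs]
      rw [pvLookupA_foldl_map, pvLookupA_foldl_map]
      have hmap : (PySem.Str.split₀ (d.getD k "")).map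
            (fun tok => if PySem.Str.isIn "special_tok" tok = false then tok else pvLookupA d f' tok)
          = (PySem.Str.split₀ (d.getD k "")).map
            (fun tok => if PySem.Str.isIn "special_tok" tok = false then tok else pvLookupA d g' tok) := by
        apply List.map_congr_left
        intro t ht
        by_cases hts : PySem.Str.isIn "special_tok" t = false
        · rw [if_pos hts, if_pos hts]
        · have htr : t ∈ pvRefs (d.getD k "") := by
            simp only [pvRefs, List.mem_filter]
            exact ⟨ht, by simpa using hts⟩
          rw [if_neg hts, if_neg hts]
          exact ih t f' g' (hrefs t htr) (by omega) (by omega)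
      rw [hmap]

-- cache invariant: every cached value is A's value for that token
def pvInv (d cache : PySem.Dict String String) : Prop :=
  ∀ k v, cache.get? k = some v → v = pvLookupA d (d.size + 1) k

theorem pvInv_insert (d cache : PySem.Dict String String) (k : String) (v : String)
    (h : pvInv d cache) (hv : v = pvLookupA d (d.size + 1) k) :
    pvInv d (cache.insert k v) := by
  intro k' v' h'
  rw [PySem.Dict.get?_insert] at h'
  split_ifs at h' with e
  · cases h'; rw [e]; exact hv
  · exact h k' v' h'
theorem pvFold_correct (d : PySem.Dict String String) (n f' : Nat)
    (ih : ∀ (k : String) (cache : PySem.Dict String String) (f : Nat),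
        pvOK d n k = true → n ≤ f → n ≤ d.size + 1 → pvInv d cache →
        pvInv d (pvSolveB d f cache k).1 ∧
        (pvSolveB d f cache k).2 = pvLookupA d (d.size + 1) k)
    (hn : n ≤ f') (hsz : n ≤ d.size) :
    ∀ (l : List String), (∀ t ∈ l, PySem.Str.isIn "special_tok" t = true → pvOK d n t = true) →
      ∀ (c : PySem.Dict String String) (acc : List String), pvInv d c →
      pvInv d ((l.foldl (fun st t =>
          if PySem.Str.isIn "special_tok" t then
            ((pvSolveB d f' st.1 t).1, st.2 ++ [(pvSolveB d f' st.1 t).2])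
          else (st.1, st.2 ++ [t])) (c, acc))).1 ∧
      (l.foldl (fun st t =>
          if PySem.Str.isIn "special_tok" t then
            ((pvSolveB d f' st.1 t).1, st.2 ++ [(pvSolveB d f' st.1 t).2])
          else (st.1, st.2 ++ [t])) (c, acc)).2
        = acc ++ l.map (fun t => if PySem.Str.isIn "special_tok" t = false then t
                                 else pvLookupA d d.size t) := by
  intro l
  induction l with
  | nil => intro _ c acc hc; simpa using hc
  | cons t l ihl =>
    intro hmem c acc hcinv
    by_cases ht : PySem.Str.isIn "special_tok" t = true
    · have hok : pvOK d n t = true := hmem t (by simp) ht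
      have hrec := ih t c f' hok hn (by omega) hcinv
      simp only [List.foldl_cons, if_pos ht]
      have h2 := ihl (fun t' ht' hs' => hmem t' (by simp [ht']) hs')
        (pvSolveB d f' c t).1 (acc ++ [(pvSolveB d f' c t).2]) hrec.1
      refine ⟨h2.1, ?_⟩
      rw [h2.2, hrec.2,
          pvLookupA_fuel d n t (d.size + 1) d.size hok (by omega) hsz,
          List.map_cons, if_neg (by rw [ht]; decide)]
      simp
    · have htf : PySem.Str.isIn "special_tok" t = false := by simpa using ht
      simp only [List.foldl_cons, if_neg ht]
      have h2 := ihl (fun t' ht' hs' => hmem t' (by simp [ht']) hs') c (acc ++ [t]) hcinv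
      refine ⟨h2.1, ?_⟩
      rw [h2.2, List.map_cons, if_pos htf]
      simp

theorem pvSolveB_correct (d : PySem.Dict String String) :
    ∀ (n : Nat) (k : String) (cache : PySem.Dict String String) (f : Nat),
      pvOK d n k = true → n ≤ f → n ≤ d.size + 1 → pvInv d cache →
      pvInv d (pvSolveB d f cache k).1 ∧
      (pvSolveB d f cache k).2 = pvLookupA d (d.size + 1) k := by
  intro n
  induction n with
  | zero => intro k cache f h _ _ _; simp [pvOK] at h
  | succ n ih =>
    intro k cache f h hf hsz hinv
    obtain ⟨f', rfl⟩ : ∃ f', f = f' + 1 := ⟨f - 1, by omega⟩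
    simp only [pvOK, Bool.and_eq_true, List.all_eq_true] at h
    obtain ⟨hk, hrefs⟩ := h
    cases hc : cache.get? k with
    | some v =>
      have hred : pvSolveB d (f' + 1) cache k = (cache, v) := by
        simp only [pvSolveB, hc]
      rw [hred]
      exact ⟨hinv, hinv k v hc⟩
    | none =>
      by_cases hs : PySem.Str.isIn "special_tok" (d.getD k "") = false
      · have hred : pvSolveB d (f' + 1) cache k
            = (cache.insert k (d.getD k ""), d.getD k "") := by
          simp only [pvSolveB, hc]
          rw [if_neg (by rw [hs]; decide)]
        rw [hred]
        have hval : d.getD k "" = pvLookupA d (d.size + 1) k := by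
          simp only [pvLookupA]
          rw [if_pos hs]
        exact ⟨pvInv_insert d cache k _ hinv hval, hval⟩
      · have hs' : PySem.Str.isIn "special_tok" (d.getD k "") = true := by
          simpa using hs
        have happ := pvFold_correct d n f' ih (by omega) (by omega)
          (PySem.Str.split₀ (d.getD k ""))
          (fun t htl hts => hrefs t (by
            simp only [pvRefs, List.mem_filter]
            exact ⟨htl, hts⟩))
          cache [] hinv
        have hval : pvLookupA d (d.size + 1) k
            = PySem.Str.strip (PySem.Str.join " "
                ((PySem.Str.split₀ (d.getD k "")).map
                  (fun t => if PySem.Str.isIn "special_tok" t = false then t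
                            else pvLookupA d d.size t))) := by
          simp only [pvLookupA]
          rw [if_neg hs, pvLookupA_foldl_map, List.nil_append]
        simp only [pvSolveB, hc, if_pos hs']
        rw [happ.2, List.nil_append, ← hval]
        exact ⟨pvInv_insert d _ k _ happ.1 rfl, rfl⟩

theorem pvAltFold (d : PySem.Dict String String) :
    ∀ (l : List String), (∀ k ∈ l, pvOK d d.size k = true) →
      ∀ (cache : PySem.Dict String String) (acc : List (String × String)), pvInv d cache →
      (l.foldl (fun st k =>
          ((pvSolveB d (d.size + 1) st.1 k).1,
           st.2 ++ [(k, (pvSolveB d (d.size + 1) st.1 k).2)])) (cache, acc)).2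
        = acc ++ l.map (fun k => (k, pvLookupA d (d.size + 1) k)) := by
  intro l
  induction l with
  | nil => intro _ c acc _; simp
  | cons k l ihl =>
    intro hmem c acc hcinv
    have hrec := pvSolveB_correct d d.size k c (d.size + 1)
      (hmem k (by simp)) (by omega) (by omega) hcinv
    simp only [List.foldl_cons]
    rw [ihl (fun k' hk' => hmem k' (by simp [hk'])) _ _ hrec.1, hrec.2]
    simp

-- ===== VERDICT (by name: the statement is the Claim_ definition above) =====
theorem raw_substitution_spec : Claim_equal_raw_substitution := by
  intro subst _hdom hpre
  unfold Spec_raw_substitution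
  unfold Pre_raw_substitution at hpre
  rw [List.all_eq_true] at hpre
  unfold raw_substitution raw_substitution_alt
  rw [pvAltFold (PySem.Dict.ofList subst) (PySem.Dict.ofList subst).keys hpre
      PySem.Dict.empty [] (fun k v h => by simp [PySem.Dict.get?_empty] at h)]
  simp
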